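-- pv_equiv track=rewrite | github.com/goufeng928/finance | LIBRARY/GF_PY3_FUNCTION_COLLECTION.py | List_1D_Interlace_Extract_Row1_Row2_Row3
-- ===== SOURCE A (Python) =====
-- def List_1D_Interlace_Extract_Row1_Row2_Row3(inputList:list) -> list:
--
--     # Example:
--     #
--     # Input:
--     # Name
--     # Type
--     # Shape
--     # token_embd.weight
--     # Q4_K
--     # [5120, 152064]
--     # blk.0.attn_k.bias
--     # F32
--     # [1024]
--     # ......
--     #
--     # Output:
--     # Name               Type  Shape
--     # token_embd.weight  Q4_K  [5120, 152064]
--     # blk.0.attn_k.bias  F32   [1024]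
--     # ......
--
--     listLength = len(inputList)
--     headIndex = 0
--     tailIndex = listLength - 1
--
--     result:list = [[], [], []]
--
--     row_1_idx = headIndex
--     row_2_idx = row_1_idx + 1
--     row_3_idx = row_1_idx + 2
--
--     while (row_1_idx <= tailIndex):
--         result[0].append(inputList[row_1_idx])
--         row_1_idx = row_1_idx + 3
--
--     while (row_2_idx <= tailIndex):
--         result[1].append(inputList[row_2_idx])
--         row_2_idx = row_2_idx + 3
--
--     while (row_3_idx <= tailIndex):
--         result[2].append(inputList[row_3_idx])
--         row_3_idx = row_3_idx + 3
--
--     return result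
-- ===== SOURCE B (Python) =====
-- def List_1D_Interlace_Extract_Row1_Row2_Row3(inputList: list) -> list:
--     # Single round-robin pass: a rotating cursor buckets each element.
--     rows = [[], [], []]
--     i = 0
--     for v in inputList:
--         rows[i].append(v)
--         i = 0 if i == 2 else i + 1
--     return rows
-- ===== Notes on version B (the rewrite author's own statement) =====
-- stated objective: simpler
-- what changed: One round-robin pass with a rotating cursor buckets each element into its row, replacing A's three separate stride-3 while-loop scans over the list.
import Mathlib
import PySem

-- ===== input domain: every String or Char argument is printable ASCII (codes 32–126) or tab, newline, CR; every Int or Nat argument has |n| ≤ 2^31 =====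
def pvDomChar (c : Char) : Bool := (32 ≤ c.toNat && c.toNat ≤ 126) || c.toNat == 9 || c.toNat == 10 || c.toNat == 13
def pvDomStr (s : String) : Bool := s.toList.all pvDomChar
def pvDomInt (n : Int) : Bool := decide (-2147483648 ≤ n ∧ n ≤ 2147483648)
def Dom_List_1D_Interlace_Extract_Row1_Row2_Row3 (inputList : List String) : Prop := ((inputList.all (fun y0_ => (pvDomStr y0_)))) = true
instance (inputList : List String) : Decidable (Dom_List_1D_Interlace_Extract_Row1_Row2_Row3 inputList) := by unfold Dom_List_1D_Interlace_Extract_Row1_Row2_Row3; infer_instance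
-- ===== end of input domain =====

-- B replaces A's three separate stride-3 while-loop scans with one round-robin pass
-- whose rotating cursor buckets each element into its row (objective: simpler).


-- ===== PORT A =====
-- A's while loop 'while idx <= tailIndex: result[r].append(inputList[idx]); idx += 3'
-- with tailIndex = len - 1; since idx starts at 0/1/2 ≥ 0, 'idx ≤ len - 1' is exactly
-- 'idx < len' (also for the empty list, where tailIndex = -1), so a Nat index is exact.
def pvRowWhile (xs : List String) (idx : Nat) : List String :=
  if h : idx < xs.length then xs[idx] :: pvRowWhile xs (idx + 3) else []
termination_by xs.length - idx

def List_1D_Interlace_Extract_Row1_Row2_Row3 (inputList : List String) : List (List String) :=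
  -- result = [[], [], []]; the three while loops fill result[0], result[1], result[2]
  [pvRowWhile inputList 0, pvRowWhile inputList 1, pvRowWhile inputList 2]

-- ===== PORT B =====
-- Source B: rows = [[],[],[]]; i = 0; for v: rows[i].append(v); i = 0 if i == 2 else i + 1
def List_1D_Interlace_Extract_Row1_Row2_Row3_alt (inputList : List String) : List (List String) :=
  let st := inputList.foldl
    (fun (st : Nat × List String × List String × List String) v =>
      let (i, a, b, c) := st
      let (a, b, c) :=
        if i = 0 then (a ++ [v], b, c)
        else if i = 1 then (a, b ++ [v], c)
        else (a, b, c ++ [v])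
      (if i = 2 then 0 else i + 1, a, b, c))
    (0, [], [], [])
  [st.2.1, st.2.2.1, st.2.2.2]

-- ===== PRECONDITION & SPEC =====
def Spec_List_1D_Interlace_Extract_Row1_Row2_Row3 (inputList : List String) (out : List (List String)) : Prop := out = List_1D_Interlace_Extract_Row1_Row2_Row3_alt inputList
instance (inputList : List String) (out : List (List String)) : Decidable (Spec_List_1D_Interlace_Extract_Row1_Row2_Row3 inputList out) := by unfold Spec_List_1D_Interlace_Extract_Row1_Row2_Row3; infer_instance

-- ===== CLAIM (what is proved, stated in full; the proofs are below) =====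
def Claim_equal_List_1D_Interlace_Extract_Row1_Row2_Row3 : Prop := ∀ (inputList : List String), Dom_List_1D_Interlace_Extract_Row1_Row2_Row3 inputList → Spec_List_1D_Interlace_Extract_Row1_Row2_Row3 inputList (List_1D_Interlace_Extract_Row1_Row2_Row3 inputList)

-- ===== LEMMAS AND PROOFS =====

-- elements at indices ≡ 0 / 1 / 2 (mod 3), defined structurally
mutual
def pvEv0 : List String → List String
  | [] => []
  | x :: xs => x :: pvEv2 xs
def pvEv1 : List String → List String
  | [] => []
  | _ :: xs => pvEv0 xs
def pvEv2 : List String → List String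
  | [] => []
  | _ :: xs => pvEv1 xs
end

theorem pvRowWhile_shift (x : String) : ∀ (n : ℕ) (xs : List String) (i : ℕ),
    xs.length - i ≤ n → pvRowWhile (x :: xs) (i + 1) = pvRowWhile xs i := by
  intro n
  induction n with
  | zero =>
    intro xs i h
    rw [pvRowWhile.eq_def (x :: xs), pvRowWhile.eq_def xs]
    have h1 : ¬ i < xs.length := by omega
    have h2 : ¬ i + 1 < (x :: xs).length := by simp only [List.length_cons]; omega
    rw [dif_neg h2, dif_neg h1]
  | succ n ih =>
    intro xs i h
    rw [pvRowWhile.eq_def (x :: xs), pvRowWhile.eq_def xs]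
    by_cases hi : i < xs.length
    · have h2 : i + 1 < (x :: xs).length := by simp only [List.length_cons]; omega
      rw [dif_pos h2, dif_pos hi]
      have hg : (x :: xs)[i + 1]'h2 = xs[i]'hi := by simp
      rw [hg]
      congr 1
      have h14 : i + 1 + 3 = i + 3 + 1 := by omega
      rw [h14]
      exact ih xs (i + 3) (by omega)
    · have h2 : ¬ i + 1 < (x :: xs).length := by simp only [List.length_cons]; omega
      rw [dif_neg h2, dif_neg hi]

theorem pvRowWhile_ev (xs : List String) :
    pvRowWhile xs 0 = pvEv0 xs ∧ pvRowWhile xs 1 = pvEv1 xs ∧ pvRowWhile xs 2 = pvEv2 xs := by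
  induction xs with
  | nil => refine ⟨?_, ?_, ?_⟩ <;> rw [pvRowWhile] <;> simp [pvEv0, pvEv1, pvEv2]
  | cons x xs ih =>
    have sh : ∀ i : ℕ, pvRowWhile (x :: xs) (i + 1) = pvRowWhile xs i := fun i =>
      pvRowWhile_shift x (xs.length) xs i (by omega)
    refine ⟨?_, ?_, ?_⟩
    · rw [pvRowWhile]
      have h : 0 < (x :: xs).length := by simp
      simp only [h, dif_pos]
      have : pvRowWhile (x :: xs) (0 + 3) = pvRowWhile xs 2 := by
        have := sh 2; simpa using this
      simp [pvEv0, this, ih.2.2]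
    · have : pvRowWhile (x :: xs) 1 = pvRowWhile xs 0 := by simpa using sh 0
      simp [pvEv1, this, ih.1]
    · have : pvRowWhile (x :: xs) 2 = pvRowWhile xs 1 := by simpa using sh 1
      simp [pvEv2, this, ih.2.1]

-- the round-robin fold, abstracted
def pvStep (st : Nat × List String × List String × List String) (v : String) :
    Nat × List String × List String × List String :=
  let (i, a, b, c) := st
  let (a, b, c) :=
    if i = 0 then (a ++ [v], b, c)
    else if i = 1 then (a, b ++ [v], c)
    else (a, b, c ++ [v])
  (if i = 2 then 0 else i + 1, a, b, c)

theorem pvFold_ev (xs : List String) : ∀ (a b c : List String),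
    (∃ r, xs.foldl pvStep (0, a, b, c) = (r, a ++ pvEv0 xs, b ++ pvEv1 xs, c ++ pvEv2 xs)) ∧
    (∃ r, xs.foldl pvStep (1, a, b, c) = (r, a ++ pvEv2 xs, b ++ pvEv0 xs, c ++ pvEv1 xs)) ∧
    (∃ r, xs.foldl pvStep (2, a, b, c) = (r, a ++ pvEv1 xs, b ++ pvEv2 xs, c ++ pvEv0 xs)) := by
  induction xs with
  | nil =>
    intro a b c
    refine ⟨⟨0, ?_⟩, ⟨1, ?_⟩, ⟨2, ?_⟩⟩ <;> simp [pvEv0, pvEv1, pvEv2]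
  | cons x xs ih =>
    intro a b c
    refine ⟨?_, ?_, ?_⟩
    · obtain ⟨r, hr⟩ := (ih (a ++ [x]) b c).2.1
      exact ⟨r, by simp [List.foldl_cons, pvStep, hr, pvEv0, pvEv1, pvEv2]⟩
    · obtain ⟨r, hr⟩ := (ih a (b ++ [x]) c).2.2
      exact ⟨r, by simp [List.foldl_cons, pvStep, hr, pvEv0, pvEv1, pvEv2]⟩
    · obtain ⟨r, hr⟩ := (ih a b (c ++ [x])).1
      exact ⟨r, by simp [List.foldl_cons, pvStep, hr, pvEv0, pvEv1, pvEv2]⟩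

theorem alt_eq_ev (xs : List String) :
    List_1D_Interlace_Extract_Row1_Row2_Row3_alt xs = [pvEv0 xs, pvEv1 xs, pvEv2 xs] := by
  obtain ⟨r, hr⟩ := (pvFold_ev xs [] [] []).1
  have hstep : (fun (st : Nat × List String × List String × List String) v =>
      let (i, a, b, c) := st
      let (a, b, c) :=
        if i = 0 then (a ++ [v], b, c)
        else if i = 1 then (a, b ++ [v], c)
        else (a, b, c ++ [v])
      (if i = 2 then 0 else i + 1, a, b, c)) = pvStep := by
    funext st v; rfl
  simp only [List_1D_Interlace_Extract_Row1_Row2_Row3_alt, hstep, hr]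
  simp

-- ===== VERDICT (by name: the statement is the Claim_ definition above) =====
theorem List_1D_Interlace_Extract_Row1_Row2_Row3_spec : Claim_equal_List_1D_Interlace_Extract_Row1_Row2_Row3 := by
  intro xs _
  unfold Spec_List_1D_Interlace_Extract_Row1_Row2_Row3
  rw [alt_eq_ev]
  obtain ⟨h0, h1, h2⟩ := pvRowWhile_ev xs
  simp [List_1D_Interlace_Extract_Row1_Row2_Row3, h0, h1, h2]
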